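-- pv_equiv track=rewrite | github.com/cbmckinstry/Pre-Clustering1 | Master.py | alltogether
-- ===== SOURCE A (Python) =====
-- def alltogether(combos,allist,damage):
--     i=zip(combos,allist,damage)
--     out=[]
--     for elem in enumerate(i):
--         out.append(elem[1])
--     twos=[]
--     threes=[]
--     fours=[]
--     fives=[]
--     sixes=[]
--     sevens=[]
--     for item in out:
--         if len(item[0])==2:
--             twos.append(item)
--         if len(item[0])==3:
--             threes.append(item)
--         if len(item[0])==4:
--             fours.append(item)
--         if len(item[0])==5:
--             fives.append(item)
--         if len(item[0])==6:
--             sixes.append(item)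
--     return twos,threes,fours,fives,sixes,sevens
-- ===== SOURCE B (Python) =====
-- def alltogether(combos, allist, damage):
--     triples = list(zip(combos, allist, damage))
--     return tuple([t for t in triples if len(t[0]) == k] for k in range(2, 7)) + ([],)
-- ===== Notes on version B (the rewrite author's own statement) =====
-- stated objective: simpler
-- what changed: Replaces A's single accumulator pass with a five-way if-chain by staged passes: one independent filter comprehension per length 2..6 over the zipped triples, plus a literal empty trailing bucket.
import Mathlib
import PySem

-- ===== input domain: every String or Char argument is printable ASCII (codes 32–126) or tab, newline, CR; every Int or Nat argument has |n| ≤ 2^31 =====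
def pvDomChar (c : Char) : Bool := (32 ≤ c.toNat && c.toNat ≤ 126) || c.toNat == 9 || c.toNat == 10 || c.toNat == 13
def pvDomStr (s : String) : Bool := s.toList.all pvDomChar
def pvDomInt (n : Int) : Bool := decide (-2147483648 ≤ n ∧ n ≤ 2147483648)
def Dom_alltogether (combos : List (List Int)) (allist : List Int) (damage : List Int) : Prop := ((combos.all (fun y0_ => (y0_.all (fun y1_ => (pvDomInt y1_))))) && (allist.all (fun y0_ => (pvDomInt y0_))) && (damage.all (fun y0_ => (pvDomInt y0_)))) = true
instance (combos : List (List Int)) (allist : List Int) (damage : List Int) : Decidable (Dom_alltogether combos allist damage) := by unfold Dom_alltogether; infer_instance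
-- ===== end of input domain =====

-- B replaces A's single accumulator pass (five lists filled through an if-chain)
-- by staged passes: one filter comprehension per length 2..6 (simpler; same O(n) cost).

-- ===== PORT A =====
-- A zips the three lists into triples, copies them into 'out' via enumerate,
-- then one pass appending to five lists through an if-chain; 'sevens' stays [].
-- pvApp n l x is one of A's five 'if len(item[0])==n: <list>.append(item)' steps.
def pvApp (n : Nat) (l : List (List Int × Int × Int)) (x : List Int × Int × Int) : List (List Int × Int × Int) :=
  if x.1.length = n then l ++ [x] else l

def pvStepA (st : List (List Int × Int × Int) × List (List Int × Int × Int) × List (List Int × Int × Int) × List (List Int × Int × Int) × List (List Int × Int × Int)) (item : List Int × Int × Int) : List (List Int × Int × Int) × List (List Int × Int × Int) × List (List Int × Int × Int) × List (List Int × Int × Int) × List (List Int × Int × Int) :=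
  (pvApp 2 st.1 item, pvApp 3 st.2.1 item, pvApp 4 st.2.2.1 item,
   pvApp 5 st.2.2.2.1 item, pvApp 6 st.2.2.2.2 item)

def alltogether (combos : List (List Int)) (allist : List Int) (damage : List Int) : List (List (List Int × Int × Int)) :=
  -- out = list(zip(combos, allist, damage)) (the enumerate loop just copies the triples)
  let out := combos.zip (allist.zip damage)
  let st := out.foldl pvStepA ([], [], [], [], [])
  [st.1, st.2.1, st.2.2.1, st.2.2.2.1, st.2.2.2.2, []]

-- ===== PORT B =====
-- triples = list(zip(...)); tuple([t for t in triples if len(t[0]) == k] for k in range(2, 7)) + ([],)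
def alltogether_alt (combos : List (List Int)) (allist : List Int) (damage : List Int) : List (List (List Int × Int × Int)) :=
  let triples := combos.zip (allist.zip damage)
  ((PySem.List.pyRange 2 7 1).map (fun k => triples.filter (fun t => ((t.1.length : Int) == k)))) ++ [[]]

-- ===== PRECONDITION & SPEC =====
def Spec_alltogether (combos : List (List Int)) (allist : List Int) (damage : List Int) (out : List (List (List Int × Int × Int))) : Prop := out = alltogether_alt combos allist damage
instance (combos : List (List Int)) (allist : List Int) (damage : List Int) (out : List (List (List Int × Int × Int))) : Decidable (Spec_alltogether combos allist damage out) := by unfold Spec_alltogether; infer_instance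

-- ===== CLAIM =====
def Claim_equal_alltogether : Prop := ∀ (combos : List (List Int)) (allist : List Int) (damage : List Int), Dom_alltogether combos allist damage → Spec_alltogether combos allist damage (alltogether combos allist damage)

-- ===== LEMMAS AND PROOFS =====

-- The fold over the 5-tuple is the tuple of the five independent folds.
theorem foldA_components (out : List (List Int × Int × Int))
    (a b c d e : List (List Int × Int × Int)) :
    out.foldl pvStepA (a, b, c, d, e) =
      (out.foldl (pvApp 2) a, out.foldl (pvApp 3) b, out.foldl (pvApp 4) c,
       out.foldl (pvApp 5) d, out.foldl (pvApp 6) e) := by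
  induction out generalizing a b c d e with
  | nil => rfl
  | cons x xs ih => simp only [List.foldl_cons, pvStepA, ih]

-- Each single bucket fold computes the filter of the zipped list by length = n.
theorem foldApp_eq_filter (out : List (List Int × Int × Int))
    (n : Nat) (a : List (List Int × Int × Int)) :
    out.foldl (pvApp n) a = a ++ out.filter (fun it => (it.1.length : Int) == (n : Int)) := by
  induction out generalizing a with
  | nil => simp
  | cons x xs ih =>
    simp only [List.foldl_cons, pvApp, List.filter_cons]
    by_cases h : x.1.length = n
    · simp [h, ih]
    · have h' : ¬ ((x.1.length : Int) = (n : Int)) := by exact_mod_cast h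
      simp [h, h', ih]

-- ===== VERDICT =====
theorem alltogether_spec : Claim_equal_alltogether := by
  intro combos allist damage _
  unfold Spec_alltogether alltogether alltogether_alt
  have hr : PySem.List.pyRange 2 7 1 = [2, 3, 4, 5, 6] := by decide
  simp only [foldA_components, foldApp_eq_filter, List.nil_append, hr, List.map_cons,
    List.map_nil, List.cons_append, List.nil_append]
  norm_num
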